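-- pv_equiv track=rewrite | github.com/zmunk/adventofcode2023 | day18.py | calculate_area
-- ===== SOURCE A (Python) =====
-- def calculate_area(gen):
--     x = 0
--     area = 1
--     for dx, dy in gen:
--         x += dx
--         if dy > 0:
--             area += dy * (x + 1)
--         elif dy < 0:
--             area += dy * x
--         elif dx > 0:
--             area += dx
--     return area
-- ===== SOURCE B (Python) =====
-- def calculate_area(gen):
--     # Transposed shoelace: walk the moves backwards with a suffix sum of dy,
--     # using sum_i dy_i * prefix_x_i == sum_j dx_j * suffix_y_j.
--     area = 1
--     y = 0
--     for dx, dy in reversed(list(gen)):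
--         y += dy
--         area += dx * y + max(dy, 0) + (dx if dy == 0 and dx > 0 else 0)
--     return area
-- ===== Notes on version B (the rewrite author's own statement) =====
-- stated objective: alternative
-- what changed: B transposes the shoelace double sum: instead of A's forward pass with a running x and dy*x terms, B walks the moves in reverse maintaining a suffix sum of dy and adds dx*ysuffix per step (plus the boundary terms), using the identity sum_i dy_i*prefix_x_i = sum_j dx_j*suffix_y_j.
import Mathlib
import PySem

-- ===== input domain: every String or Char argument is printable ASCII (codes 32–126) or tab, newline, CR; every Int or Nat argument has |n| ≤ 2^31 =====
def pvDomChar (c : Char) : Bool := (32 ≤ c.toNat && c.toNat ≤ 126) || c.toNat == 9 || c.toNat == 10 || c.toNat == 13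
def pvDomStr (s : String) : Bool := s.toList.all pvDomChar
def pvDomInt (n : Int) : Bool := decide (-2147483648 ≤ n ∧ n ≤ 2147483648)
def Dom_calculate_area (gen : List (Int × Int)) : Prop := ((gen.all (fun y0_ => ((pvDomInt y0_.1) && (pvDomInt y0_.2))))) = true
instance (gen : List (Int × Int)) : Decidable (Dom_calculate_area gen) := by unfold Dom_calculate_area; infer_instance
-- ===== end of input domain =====

-- B replaces A's forward running-x shoelace pass by a reversed traversal with a suffix-dy accumulator (transposed double sum); alternative decomposition, same cost.


-- ===== PORT A =====
-- literal transliteration: running state (x, area), branches in A's order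
def calculate_area (gen : List (Int × Int)) : Int :=
  (gen.foldl
    (fun (s : Int × Int) p =>
      let x := s.1 + p.1
      let area :=
        if p.2 > 0 then s.2 + p.2 * (x + 1)
        else if p.2 < 0 then s.2 + p.2 * x
        else if p.1 > 0 then s.2 + p.1
        else s.2
      (x, area))
    (0, 1)).2

-- ===== PORT B =====
-- reversed traversal with state (y, area): y is the suffix sum of dy
def calculate_area_alt (gen : List (Int × Int)) : Int :=
  (gen.reverse.foldl
    (fun (s : Int × Int) p =>
      let y := s.1 + p.2
      (y, s.2 + (p.1 * y + max p.2 0 + (if p.2 == 0 && p.1 > 0 then p.1 else 0))))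
    (0, 1)).2

-- ===== PRECONDITION & SPEC =====
def Spec_calculate_area (gen : List (Int × Int)) (out : Int) : Prop := out = calculate_area_alt gen
instance (gen : List (Int × Int)) (out : Int) : Decidable (Spec_calculate_area gen out) := by unfold Spec_calculate_area; infer_instance

-- ===== CLAIM (what is proved, stated in full; the proofs are below) =====
def Claim_equal_calculate_area : Prop := ∀ (gen : List (Int × Int)), Dom_calculate_area gen → Spec_calculate_area gen (calculate_area gen)

-- ===== LEMMAS AND PROOFS =====

-- suffix sum of the dy components
def ySum (gen : List (Int × Int)) : Int :=
  match gen with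
  | [] => 0
  | (_, dy) :: t => dy + ySum t

-- common value: per-step contribution dx * (suffix dy incl. this step + y0) + boundary terms
def tSum (gen : List (Int × Int)) (y0 : Int) : Int :=
  match gen with
  | [] => 0
  | (dx, dy) :: t =>
      dx * (y0 + dy + ySum t) + max dy 0 + (if dy == 0 && dx > 0 then dx else 0) + tSum t y0

theorem foldA_eq (gen : List (Int × Int)) : ∀ (x area : Int),
    (gen.foldl
      (fun (s : Int × Int) p =>
        let x := s.1 + p.1
        let area :=
          if p.2 > 0 then s.2 + p.2 * (x + 1)
          else if p.2 < 0 then s.2 + p.2 * x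
          else if p.1 > 0 then s.2 + p.1
          else s.2
        (x, area))
      (x, area)).2 = area + x * ySum gen + tSum gen 0 := by
  induction gen with
  | nil => intro x area; simp [ySum, tSum]
  | cons h t ih =>
      intro x area
      obtain ⟨dx, dy⟩ := h
      simp only [List.foldl_cons, ih, ySum, tSum]
      have hc : (if dy > 0 then area + dy * (x + dx + 1)
                 else if dy < 0 then area + dy * (x + dx)
                 else if dx > 0 then area + dx
                 else area)
          = area + dy * (x + dx) + max dy 0 + (if dy == 0 && dx > 0 then dx else 0) := by
        rcases lt_trichotomy dy 0 with hlt | heq | hgt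
        · rw [if_neg (by omega), if_pos hlt, max_eq_right (le_of_lt hlt),
            show (dy == 0) = false by simp; omega]
          simp
        · subst heq; simp
          split_ifs <;> simp
        · rw [if_pos hgt, max_eq_left (le_of_lt hgt),
            show (dy == 0) = false by simp; omega]
          simp; ring
      rw [hc]; ring

theorem foldB_eq (gen : List (Int × Int)) : ∀ (y area : Int),
    (gen.reverse.foldl
      (fun (s : Int × Int) p =>
        let y := s.1 + p.2
        (y, s.2 + (p.1 * y + max p.2 0 + (if p.2 == 0 && p.1 > 0 then p.1 else 0))))
      (y, area)) = (y + ySum gen, area + tSum gen y) := by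
  induction gen with
  | nil => intro y area; simp [ySum, tSum]
  | cons h t ih =>
      intro y area
      obtain ⟨dx, dy⟩ := h
      simp only [List.reverse_cons, List.foldl_append, ih, List.foldl_cons, List.foldl_nil,
        ySum, tSum]
      rw [Prod.mk.injEq]
      refine ⟨by ring, ?_⟩
      ring_nf

-- ===== VERDICT (by name: the statement is the Claim_ definition above) =====
theorem calculate_area_spec : Claim_equal_calculate_area := by
  intro gen _
  unfold Spec_calculate_area calculate_area calculate_area_alt
  rw [foldA_eq, foldB_eq]
  ring_nf
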